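-- pv_equiv track=rewrite | github.com/andcavan/PDM-SW-2 | core/reg_manager.py | _minimize_cleanup_keys
-- ===== SOURCE A (Python) =====
-- def _is_registry_parent(parent_key: str, child_key: str) -> bool:
--     p = parent_key.rstrip("\\").casefold()
--     c = child_key.rstrip("\\").casefold()
--     return c == p or c.startswith(f"{p}\\")
--
-- def _minimize_cleanup_keys(raw_keys: list[str]) -> list[str]:
--     unique: dict[str, str] = {}
--     for key in raw_keys:
--         n = key.strip()
--         if n and n.casefold() not in unique:
--             unique[n.casefold()] = n
--     minimized = []
--     for key in sorted(unique.values(),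
--                       key=lambda k: (k.count("\\"), len(k), k.casefold())):
--         if not any(_is_registry_parent(e, key) for e in minimized):
--             minimized.append(key)
--     return minimized
-- ===== SOURCE B (Python) =====
-- def _minimize_cleanup_keys(raw_keys: list[str]) -> list[str]:
--     unique: dict[str, str] = {}
--     for key in raw_keys:
--         n = key.strip()
--         if n:
--             unique.setdefault(n.casefold(), n)
--     minimized: list[str] = []
--     accepted: set[str] = set()
--     for key in sorted(unique.values(),
--                       key=lambda k: (k.count("\\"), len(k), k.casefold())):
--         c = key.rstrip("\\").casefold()
--         if c not in accepted and not any(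
--                 c[:i] in accepted for i, ch in enumerate(c) if ch == "\\"):
--             minimized.append(key)
--             accepted.add(c)
--     return minimized
-- ===== Notes on version B (the rewrite author's own statement) =====
-- stated objective: faster
-- what changed: B indexes the accepted keys in a set of normalised (rstrip-backslash + casefold) strings and tests each candidate's own normal form and its backslash-ancestor prefixes for membership, instead of A's inner rescan of every previously accepted key with _is_registry_parent.
import Mathlib
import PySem

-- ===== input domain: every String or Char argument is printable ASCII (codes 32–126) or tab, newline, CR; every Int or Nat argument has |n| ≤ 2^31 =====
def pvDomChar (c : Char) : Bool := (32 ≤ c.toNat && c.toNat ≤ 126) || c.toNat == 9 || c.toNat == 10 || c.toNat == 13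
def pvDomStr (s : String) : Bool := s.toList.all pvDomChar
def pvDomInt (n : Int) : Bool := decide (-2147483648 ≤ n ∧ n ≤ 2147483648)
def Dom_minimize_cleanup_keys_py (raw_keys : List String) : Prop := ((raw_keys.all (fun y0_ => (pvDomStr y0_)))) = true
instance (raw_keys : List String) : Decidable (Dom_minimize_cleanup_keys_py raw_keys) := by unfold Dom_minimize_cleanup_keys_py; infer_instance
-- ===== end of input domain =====

-- B replaces A's inner rescan of all accepted keys by a set of normalised accepted keys probed for the key and its backslash-ancestor prefixes; return-value equivalence, no mutation involved.

-- shared primitive helpers (used by both ports, mirroring the same Python expressions):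
-- exact port of s.rstrip("\\") — right-only strip of '\' (PySem.Chars.stripChars strips both ends)
def rstripBackslash (s : List Char) : List Char := (s.reverse.dropWhile (· == '\\')).reverse
-- exact port of the sort key lambda k: (k.count("\\"), len(k), k.casefold()); on the ASCII domain casefold = lower.
-- Python's tuple order is encoded as the lexicographic order on List ℕ: this is exact because the character
-- codes are only compared when the counts and the lengths are equal (so the two code lists have equal length)
def pvSortKey (k : String) : List ℕ :=
  [PySem.Str.count k "\\", k.toList.length] ++ (PySem.Str.lower k).toList.map Char.toNat

-- ===== PORT A =====
-- _is_registry_parent; rstrip("\\") and casefold ported at the List Char level (casefold = lower on ASCII)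
def is_registry_parent_py (parent_key child_key : String) : Bool :=
  let p := PySem.Chars.lower (rstripBackslash parent_key.toList)
  let c := PySem.Chars.lower (rstripBackslash child_key.toList)
  c == p || PySem.Chars.startswith c (p ++ ['\\'])

def minimize_cleanup_keys_py (raw_keys : List String) : List String :=
  let unique : PySem.Dict String String := raw_keys.foldl (fun d key =>
    let n := PySem.Str.strip key
    if !n.toList.isEmpty && !(d.contains (PySem.Str.lower n)) then d.insert (PySem.Str.lower n) n
    else d) PySem.Dict.empty
  (PySem.List.sorted unique.values pvSortKey false).foldl (fun minimized key =>
    if !(minimized.any fun e => is_registry_parent_py e key) then minimized ++ [key]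
    else minimized) []

-- ===== PORT B =====
def minimize_cleanup_keys_py_alt (raw_keys : List String) : List String :=
  let unique : PySem.Dict String String := raw_keys.foldl (fun d key =>
    let n := PySem.Str.strip key
    if !n.toList.isEmpty then d.setdefault (PySem.Str.lower n) n else d) PySem.Dict.empty
  ((PySem.List.sorted unique.values pvSortKey false).foldl
    (fun (acc : List String × PySem.Set (List Char)) key =>
      let c := PySem.Chars.lower (rstripBackslash key.toList)
      if !(PySem.Set.contains acc.2 c) &&
         !((PySem.List.enumerate c 0).any fun p =>
             p.2 == '\\' && PySem.Set.contains acc.2 (PySem.List.slice c none (some p.1)))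
      then (acc.1 ++ [key], PySem.Set.add acc.2 c)
      else acc) ([], PySem.Set.empty)).1

-- ===== PRECONDITION & SPEC =====
def Spec_minimize_cleanup_keys_py (raw_keys : List String) (out : List String) : Prop := out = minimize_cleanup_keys_py_alt raw_keys
instance (raw_keys : List String) (out : List String) : Decidable (Spec_minimize_cleanup_keys_py raw_keys out) := by unfold Spec_minimize_cleanup_keys_py; infer_instance

-- ===== CLAIM (what is proved, stated in full; the proofs are below) =====
def Claim_equal_minimize_cleanup_keys_py : Prop := ∀ (raw_keys : List String), Dom_minimize_cleanup_keys_py raw_keys → Spec_minimize_cleanup_keys_py raw_keys (minimize_cleanup_keys_py raw_keys)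

-- ===== LEMMAS AND PROOFS =====
def pvNorm (key : String) : List Char := PySem.Chars.lower (rstripBackslash key.toList)

-- p++['\\'] is a prefix of c iff some index i of c holds '\\' with c.take i = p
lemma startswith_backslash_iff (cs p : List Char) :
    PySem.Chars.startswith cs (p ++ ['\\']) = true ↔
      ∃ i : ℕ, i < cs.length ∧ cs[i]? = some '\\' ∧ cs.take i = p := by
  rw [PySem.Chars.startswith_iff]
  constructor
  · rintro ⟨t, ht⟩
    refine ⟨p.length, ?_, ?_, ?_⟩
    · rw [← ht]; simp
    · rw [← ht]; simp
    · rw [← ht]; simp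
  · rintro ⟨i, hi, hget, htake⟩
    refine ⟨cs.drop (i + 1), ?_⟩
    have hdrop := List.drop_eq_getElem_cons hi
    have hcs : cs[i] = '\\' := by
      have := List.getElem?_eq_getElem hi
      rw [this] at hget; exact (Option.some_injective _ hget).symm ▸ rfl
    calc p ++ ['\\'] ++ cs.drop (i + 1) = cs.take i ++ (cs[i] :: cs.drop (i + 1)) := by
          rw [htake, hcs]; simp
      _ = cs.take i ++ cs.drop i := by rw [hdrop]
      _ = cs := List.take_append_drop i cs

-- B's membership test over the stored normalised set equals A's scan of the accepted keys
lemma testB_eq (S : List (List Char)) (cs : List Char) :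
    (PySem.Set.contains S cs ||
      ((PySem.List.enumerate cs 0).any fun p =>
         p.2 == '\\' && PySem.Set.contains S (PySem.List.slice cs none (some p.1)))) =
    S.any (fun pfx => cs == pfx || PySem.Chars.startswith cs (pfx ++ ['\\'])) := by
  rw [Bool.eq_iff_iff]
  simp only [Bool.or_eq_true, List.any_eq_true, Bool.and_eq_true, beq_iff_eq,
    PySem.Set.contains_iff, PySem.List.mem_enumerate_iff, startswith_backslash_iff]
  constructor
  · rintro (hc | ⟨⟨j, ch⟩, ⟨k, hk, hpk⟩, hch, hmem⟩)
    · exact ⟨cs, hc, Or.inl rfl⟩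
    · obtain ⟨h1, h2⟩ := Prod.mk.injEq .. ▸ hpk
      subst h1; subst h2
      refine ⟨PySem.List.slice cs none (some (0 + (k:ℤ))), hmem, Or.inr ⟨k, hk, ?_, ?_⟩⟩
      · rw [List.getElem?_eq_getElem hk]; exact congrArg some hch
      · rw [zero_add, PySem.List.slice_to_natCast]
  · rintro ⟨pfx, hmem, (rfl | ⟨i, hi, hget, rfl⟩)⟩
    · exact Or.inl hmem
    · refine Or.inr ⟨(0 + (i:ℤ), cs.get ⟨i, hi⟩), ⟨i, hi, rfl⟩, ?_, ?_⟩
      · have := List.getElem?_eq_getElem hi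
        rw [this] at hget
        exact Option.some.inj hget
      · rwa [zero_add, PySem.List.slice_to_natCast]

lemma loop_eq (l : List String) (m : List String) :
    (l.foldl (fun (acc : List String × PySem.Set (List Char)) key =>
      let c := PySem.Chars.lower (rstripBackslash key.toList)
      if !(PySem.Set.contains acc.2 c) &&
         !((PySem.List.enumerate c 0).any fun p =>
             p.2 == '\\' && PySem.Set.contains acc.2 (PySem.List.slice c none (some p.1)))
      then (acc.1 ++ [key], PySem.Set.add acc.2 c)
      else acc) (m, m.map pvNorm)).1 =
    l.foldl (fun minimized key =>
      if !(minimized.any fun e => is_registry_parent_py e key) then minimized ++ [key]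
      else minimized) m := by
  induction l generalizing m with
  | nil => rfl
  | cons k t ih =>
    simp only [List.foldl_cons]
    have hcond : (PySem.Set.contains (m.map pvNorm) (PySem.Chars.lower (rstripBackslash k.toList)) ||
        ((PySem.List.enumerate (PySem.Chars.lower (rstripBackslash k.toList)) 0).any fun p =>
           p.2 == '\\' && PySem.Set.contains (m.map pvNorm)
             (PySem.List.slice (PySem.Chars.lower (rstripBackslash k.toList)) none (some p.1)))) =
        m.any (fun e => is_registry_parent_py e k) := by
      rw [testB_eq, List.any_map]
      rfl
    cases h : m.any (fun e => is_registry_parent_py e k) with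
    | true =>
      rw [h] at hcond
      have hif : (!(PySem.Set.contains (m.map pvNorm) (PySem.Chars.lower (rstripBackslash k.toList))) &&
          !((PySem.List.enumerate (PySem.Chars.lower (rstripBackslash k.toList)) 0).any fun p =>
             p.2 == '\\' && PySem.Set.contains (m.map pvNorm)
               (PySem.List.slice (PySem.Chars.lower (rstripBackslash k.toList)) none (some p.1)))) = false := by
        rw [← Bool.not_or, hcond]; rfl
      rw [hif]
      simp only [Bool.false_eq_true, if_false, Bool.not_true]
      exact ih m
    | false =>
      rw [h] at hcond
      have hnc : PySem.Set.contains (m.map pvNorm) (PySem.Chars.lower (rstripBackslash k.toList)) = false :=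
        (Bool.or_eq_false_iff.mp hcond).1
      have hif : (!(PySem.Set.contains (m.map pvNorm) (PySem.Chars.lower (rstripBackslash k.toList))) &&
          !((PySem.List.enumerate (PySem.Chars.lower (rstripBackslash k.toList)) 0).any fun p =>
             p.2 == '\\' && PySem.Set.contains (m.map pvNorm)
               (PySem.List.slice (PySem.Chars.lower (rstripBackslash k.toList)) none (some p.1)))) = true := by
        rw [← Bool.not_or, hcond]; rfl
      rw [hif]
      simp only [if_true, Bool.not_false]
      have hadd : PySem.Set.add (m.map pvNorm) (PySem.Chars.lower (rstripBackslash k.toList)) =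
          (m ++ [k]).map pvNorm := by
        rw [PySem.Set.add_of_not_mem, List.map_append]
        · rfl
        · intro hmem
          rw [(PySem.Set.contains_iff (m.map pvNorm) _).mpr hmem] at hnc
          exact Bool.true_eq_false.mp hnc
      rw [hadd]
      exact ih (m ++ [k])

lemma dict_eq (raw_keys : List String) (d : PySem.Dict String String) :
    raw_keys.foldl (fun d key =>
      let n := PySem.Str.strip key
      if !n.toList.isEmpty && !(d.contains (PySem.Str.lower n)) then d.insert (PySem.Str.lower n) n
      else d) d =
    raw_keys.foldl (fun d key =>
      let n := PySem.Str.strip key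
      if !n.toList.isEmpty then d.setdefault (PySem.Str.lower n) n else d) d := by
  have hstep : ∀ (d : PySem.Dict String String) (key : String),
      (let n := PySem.Str.strip key
       if !n.toList.isEmpty && !(d.contains (PySem.Str.lower n)) then d.insert (PySem.Str.lower n) n
       else d) =
      (let n := PySem.Str.strip key
       if !n.toList.isEmpty then d.setdefault (PySem.Str.lower n) n else d) := by
    intro d key
    by_cases hn : PySem.Chars.strip key.toList = []
    · simp [hn]
    · cases hc : PySem.Dict.contains d (PySem.Str.lower (PySem.Str.strip key))
      · simp [hn, hc, PySem.Dict.setdefault_of_not_contains _ _ hc]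
      · simp [hn, hc, PySem.Dict.setdefault_of_contains _ _ hc]
  induction raw_keys generalizing d with
  | nil => rfl
  | cons key t ih =>
    simp only [List.foldl_cons]
    rw [hstep d key]
    exact ih _

-- ===== VERDICT (by name: the statement is the Claim_ definition above) =====
theorem minimize_cleanup_keys_py_spec : Claim_equal_minimize_cleanup_keys_py := by
  intro raw_keys _
  unfold Spec_minimize_cleanup_keys_py minimize_cleanup_keys_py minimize_cleanup_keys_py_alt
  rw [dict_eq]
  exact (loop_eq _ []).symm
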